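-- pv_equiv track=rewrite | github.com/MShinigami/DSL | AS01DSL.py | high_freq
-- ===== SOURCE A (Python) =====
-- def high_freq(marks):
--     count = 0
--     hs = marks[0]
--     for s in marks:
--         if s > hs:
--             hs = s
--     for b in marks:
--         if b == hs:
--             count = count + 1
--     return hs, count
-- ===== SOURCE B (Python) =====
-- def high_freq(marks):
--     hs = marks[0]
--     count = 0
--     for s in marks:
--         if s > hs:
--             hs = s
--             count = 1
--         elif s == hs:
--             count = count + 1
--     return hs, count
-- ===== Notes on version B (the rewrite author's own statement) =====
-- stated objective: alternative
-- what changed: B replaces A's two sequential scans (one for the max, one counting its occurrences) with a single pass maintaining the running maximum together with its count, resetting the count when a new maximum appears.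
import Mathlib
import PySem

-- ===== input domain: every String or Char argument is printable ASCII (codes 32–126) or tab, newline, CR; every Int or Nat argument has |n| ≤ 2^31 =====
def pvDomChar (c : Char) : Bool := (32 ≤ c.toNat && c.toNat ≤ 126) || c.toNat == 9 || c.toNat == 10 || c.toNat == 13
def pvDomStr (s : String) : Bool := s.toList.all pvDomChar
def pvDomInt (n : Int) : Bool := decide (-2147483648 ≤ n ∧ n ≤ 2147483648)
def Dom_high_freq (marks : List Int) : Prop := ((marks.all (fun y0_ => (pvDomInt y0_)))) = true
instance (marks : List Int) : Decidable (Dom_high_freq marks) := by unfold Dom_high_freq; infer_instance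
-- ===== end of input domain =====

-- B fuses A's two scans (max, then occurrence count) into one pass with a reset-on-new-max counter.


-- ===== PORT A =====
-- marks[0] raises IndexError on []; that input is excluded by Pre_high_freq, the [] branch is arbitrary.
def high_freq (marks : List Int) : Int × Int :=
  match marks with
  | [] => (0, 0)
  | m0 :: _ =>
    let hs := marks.foldl (fun hs s => if s > hs then s else hs) m0
    let count := marks.foldl (fun count b => if b = hs then count + 1 else count) (0 : Int)
    (hs, count)

-- ===== PORT B =====
def high_freq_alt (marks : List Int) : Int × Int :=
  match marks with
  | [] => (0, 0)
  | m0 :: _ =>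
    marks.foldl
      (fun (st : Int × Int) s =>
        if s > st.1 then (s, 1)
        else if s = st.1 then (st.1, st.2 + 1)
        else st)
      (m0, 0)

-- ===== PRECONDITION & SPEC =====
-- Python A raises IndexError on the empty list (marks[0]).
def Pre_high_freq (marks : List Int) : Prop := marks ≠ []
instance (marks : List Int) : Decidable (Pre_high_freq marks) := by unfold Pre_high_freq; infer_instance
def pvWitness_high_freq : List Int := [3, 1, 3]
def Spec_high_freq (marks : List Int) (out : Int × Int) : Prop := out = high_freq_alt marks
instance (marks : List Int) (out : Int × Int) : Decidable (Spec_high_freq marks out) := by unfold Spec_high_freq; infer_instance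

-- ===== CLAIM (what is proved, stated in full; the proofs are below) =====
def Claim_equal_high_freq : Prop := ∀ (marks : List Int), Dom_high_freq marks → Pre_high_freq marks → Spec_high_freq marks (high_freq marks)

-- ===== LEMMAS AND PROOFS =====

def maxStep : Int → Int → Int := fun hs s => if s > hs then s else hs

def cntEq (x : Int) : List Int → Int
  | [] => 0
  | a :: l => (if a = x then 1 else 0) + cntEq x l

theorem le_foldl_maxStep (l : List Int) (hs : Int) : hs ≤ l.foldl maxStep hs := by
  induction l generalizing hs with
  | nil => simp
  | cons a l ih =>
    simp only [List.foldl_cons]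
    refine le_trans ?_ (ih (maxStep hs a))
    simp only [maxStep]; split <;> omega

theorem count_foldl_eq (l : List Int) (x c : Int) :
    l.foldl (fun count b => if b = x then count + 1 else count) c = c + cntEq x l := by
  induction l generalizing c with
  | nil => simp [cntEq]
  | cons a l ih => simp only [List.foldl_cons, cntEq, ih]; split <;> omega

theorem pair_foldl_eq (l : List Int) (hs c : Int) :
    l.foldl
      (fun (st : Int × Int) s =>
        if s > st.1 then (s, 1)
        else if s = st.1 then (st.1, st.2 + 1)
        else st)
      (hs, c)
    = (l.foldl maxStep hs,
       (if hs = l.foldl maxStep hs then c else 0) + cntEq (l.foldl maxStep hs) l) := by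
  induction l generalizing hs c with
  | nil => simp [cntEq]
  | cons a l ih =>
    simp only [List.foldl_cons]
    by_cases h1 : a > hs
    · have hm : maxStep hs a = a := by simp [maxStep, h1]
      have hlt : hs < l.foldl maxStep a := lt_of_lt_of_le h1 (le_foldl_maxStep l a)
      rw [if_pos h1, ih]
      simp only [hm, cntEq]
      have : ¬ hs = l.foldl maxStep a := by omega
      rw [if_neg this]
      congr 1
      split <;> omega
    · have hm : maxStep hs a = hs := by simp [maxStep, h1]
      rw [if_neg h1]
      simp only [hm]
      by_cases h2 : a = hs
      · rw [if_pos h2, ih, cntEq]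
        have hle := le_foldl_maxStep l hs
        congr 1
        by_cases h3 : hs = l.foldl maxStep hs
        · rw [if_pos h3, if_pos h3, if_pos (h2.trans h3)]; omega
        · rw [if_neg h3, if_neg h3, if_neg (show ¬ a = List.foldl maxStep hs l from fun h => h3 (h2.symm.trans h))]; omega
      · rw [if_neg (by simpa using h2), ih, cntEq]
        congr 1
        have hle := le_foldl_maxStep l hs
        have : ¬ a = l.foldl maxStep hs := by omega
        rw [if_neg this]
        omega

-- ===== VERDICT (by name: the statement is the Claim_ definition above) =====
theorem high_freq_spec : Claim_equal_high_freq := by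
  intro marks _ hpre
  unfold Spec_high_freq high_freq high_freq_alt
  match marks with
  | [] => exact absurd rfl hpre
  | m0 :: rest =>
    simp only
    rw [show (fun hs s => if s > hs then s else hs) = maxStep from rfl,
        pair_foldl_eq, count_foldl_eq]
    congr 1
    split <;> omega
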